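-- pv_equiv track=rewrite | github.com/Pedram-Boluri/pedram-bolouri | EX3/EX3_3.py | EX3_3
-- ===== SOURCE A (Python) =====
-- def EX3_3 (List):
--     '''
--     (List) -> bool
--
--         This is the "Robot Path" function, which works by giving it a set
--         of movement commands. The commands are 'n,' 'e,' 's,' and 'w'(North,
--         East, South and West). The robot moves one step for each command in
--         the respective direction.
--
--         The function will returns True if the robot reaches any of the wanted
--         destinations, False otherwise.
--
--         The acceptable destinations are:
--             Destination No. 1: e, n, e, e, n
--             Destination No. 2: w, n, w, n, w, w, n
--
--         Examples:
--             EX3_3( ["s", "e", "e", "n", "n", "e", ”n"] ) ➞ True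
--             # Robot will end up at destination no. 1
--
--             EX3_3( ["n", "e", "s", "w", "n", "e", "s", "w", "w", \
--             "s", "n", ”e"] ) ➞ False
--             # Robot will be lost somewhere
--
--             EX3_3( ["n", "s", "n", "n", "e", "n", "w", \
--             "w", "s", "w", "w", "w", ”n"] ) ➞ True
--         '''
--
--
--     x = 0
--     y = 0
--     for direction in List:
--         if direction == 'n':
--             x += 1
--         elif direction == 's':
--             x -= 1
--         elif direction == 'e':
--             y += 1
--         elif direction == 'w':
--             y -= 1
--
--     if (x == 2 and y == 3) or (x == 3 and y == -4):
--         return True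
--     else:
--         return False
-- ===== SOURCE B (Python) =====
-- def EX3_3(List):
--     STEP = {'n': (1, 0), 's': (-1, 0), 'e': (0, 1), 'w': (0, -1)}
--
--     def disp(lo, hi):
--         # net displacement of List[lo:hi], by divide and conquer
--         if hi - lo == 0:
--             return (0, 0)
--         if hi - lo == 1:
--             return STEP.get(List[lo], (0, 0))
--         mid = (lo + hi) // 2
--         x1, y1 = disp(lo, mid)
--         x2, y2 = disp(mid, hi)
--         return (x1 + x2, y1 + y2)
--
--     return disp(0, len(List)) in {(2, 3), (3, -4)}
-- ===== Notes on version B (the rewrite author's own statement) =====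
-- stated objective: alternative
-- what changed: Replaces the left-to-right if/elif coordinate accumulation with a divide-and-conquer computation: the list is split in halves recursively, each half's net displacement (from a direction-to-vector table at the leaves) is computed and the two vectors are added, and the total is tested for membership in the set of the two target positions.
import Mathlib
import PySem

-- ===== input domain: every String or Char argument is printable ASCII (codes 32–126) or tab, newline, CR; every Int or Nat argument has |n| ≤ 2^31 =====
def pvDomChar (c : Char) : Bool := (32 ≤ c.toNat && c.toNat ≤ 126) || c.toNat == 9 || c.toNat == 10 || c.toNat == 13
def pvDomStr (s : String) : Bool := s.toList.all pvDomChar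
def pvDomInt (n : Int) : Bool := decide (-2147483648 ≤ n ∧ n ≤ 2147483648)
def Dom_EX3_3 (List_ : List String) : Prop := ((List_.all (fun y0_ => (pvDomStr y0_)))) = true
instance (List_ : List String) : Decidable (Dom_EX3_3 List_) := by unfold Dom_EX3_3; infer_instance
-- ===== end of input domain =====

-- B computes the net displacement by divide and conquer (split the list in halves, add the
-- two halves' displacement vectors, direction table at the leaves); alternative decomposition, same O(n) cost.

-- ===== PORT A =====
-- A's loop: per-element if/elif chain updating (x, y), then the two-target test
def EX3_3 (List_ : List String) : Bool :=
  let st := List_.foldl (fun (p : Int × Int) direction =>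
    if direction = "n" then (p.1 + 1, p.2)
    else if direction = "s" then (p.1 - 1, p.2)
    else if direction = "e" then (p.1, p.2 + 1)
    else if direction = "w" then (p.1, p.2 - 1)
    else p) (0, 0)
  if (st.1 = 2 ∧ st.2 = 3) ∨ (st.1 = 3 ∧ st.2 = -4) then true else false

-- ===== PORT B =====
-- the STEP dict literal of Source B
def pvStep : PySem.Dict String (Int × Int) :=
  PySem.Dict.ofList [("n", (1, 0)), ("s", (-1, 0)), ("e", (0, 1)), ("w", (0, -1))]

-- disp(lo, hi) of Source B, written on the slice List_[lo:hi] itself: empty and singleton leaves,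
-- otherwise split at the midpoint and add the two halves' displacements
def pvDispF : Nat → List String → Int × Int
  | 0, _ => (0, 0)
  | fuel + 1, l =>
    if l.length = 0 then (0, 0)
    else if l.length = 1 then pvStep.getD l.headI (0, 0)
    else
      let m := l.length / 2
      let a := pvDispF fuel (l.take m)
      let b := pvDispF fuel (l.drop m)
      (a.1 + b.1, a.2 + b.2)

-- fuel = the slice length, only a totality guard: it never runs out (pvDispF_char)
def pvDisp (l : List String) : Int × Int := pvDispF l.length l

-- B: membership of the total displacement in the set of the two targets
def EX3_3_alt (List_ : List String) : Bool :=
  decide (pvDisp List_ ∈ PySem.Set.ofList ([(2, 3), (3, -4)] : List (Int × Int)))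

-- ===== PRECONDITION & SPEC =====
def Spec_EX3_3 (List_ : List String) (out : Bool) : Prop := out = EX3_3_alt List_
instance (List_ : List String) (out : Bool) : Decidable (Spec_EX3_3 List_ out) := by unfold Spec_EX3_3; infer_instance

-- ===== CLAIM (what is proved, stated in full; the proofs are below) =====
def Claim_equal_EX3_3 : Prop := ∀ (List_ : List String), Dom_EX3_3 List_ → Spec_EX3_3 List_ (EX3_3 List_)

-- ===== LEMMAS AND PROOFS =====

-- A's fold state after the whole list = start + (count n − count s, count e − count w)
theorem EX3_3_fold_char (L : List String) (x y : Int) :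
    L.foldl (fun (p : Int × Int) direction =>
      if direction = "n" then (p.1 + 1, p.2)
      else if direction = "s" then (p.1 - 1, p.2)
      else if direction = "e" then (p.1, p.2 + 1)
      else if direction = "w" then (p.1, p.2 - 1)
      else p) (x, y)
    = (x + (L.count "n" : Int) - (L.count "s" : Int),
       y + (L.count "e" : Int) - (L.count "w" : Int)) := by
  induction L generalizing x y with
  | nil => simp
  | cons h t ih =>
    simp only [List.foldl_cons]
    split_ifs with h1 h2 h3 h4 <;>
      rw [ih] <;>
      refine Prod.ext ?_ ?_ <;>
      simp [*] <;> omega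

-- B's divide and conquer also computes (count n − count s, count e − count w)
theorem pvDispF_char (fuel : Nat) (L : List String) (hf : L.length ≤ fuel) :
    pvDispF fuel L = ((L.count "n" : Int) - (L.count "s" : Int),
                      (L.count "e" : Int) - (L.count "w" : Int)) := by
  induction fuel generalizing L with
  | zero =>
    have : L = [] := List.length_eq_zero_iff.mp (Nat.le_zero.mp hf)
    simp [this, pvDispF]
  | succ n ih =>
    by_cases h0 : L.length = 0
    · have : L = [] := List.length_eq_zero_iff.mp h0
      simp [this, pvDispF]
    by_cases h1 : L.length = 1
    · obtain ⟨c, rfl⟩ := List.length_eq_one_iff.mp h1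
      have hone : pvDispF (n + 1) [c] = pvStep.getD c (0, 0) := by simp [pvDispF]
      rw [hone]
      have hmk : pvStep = PySem.Dict.mk [("n", (1, 0)), ("s", (-1, 0)), ("e", (0, 1)), ("w", (0, -1))] := rfl
      by_cases hn : c = "n"
      · subst hn; decide
      by_cases hs : c = "s"
      · subst hs; decide
      by_cases he : c = "e"
      · subst he; decide
      by_cases hw : c = "w"
      · subst hw; decide
      have e1 : (("n" : String) == c) = false := by simp [Ne.symm hn]
      have e2 : (("s" : String) == c) = false := by simp [Ne.symm hs]
      have e3 : (("e" : String) == c) = false := by simp [Ne.symm he]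
      have e4 : (("w" : String) == c) = false := by simp [Ne.symm hw]
      simp [hmk, PySem.Dict.getD_eq_get?_getD, PySem.Dict.get?, List.find?, e1, e2, e3, e4,
        hn, hs, he, hw]
    · rw [pvDispF]
      simp only [if_neg h0, if_neg h1]
      have hm1 : (L.take (L.length / 2)).length ≤ n := by
        simp only [List.length_take]; omega
      have hm2 : (L.drop (L.length / 2)).length ≤ n := by
        simp only [List.length_drop]; omega
      rw [ih _ hm1, ih _ hm2]
      have hc : ∀ s : String,
          L.count s = (L.take (L.length / 2)).count s + (L.drop (L.length / 2)).count s := by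
        intro s
        have h := List.count_append (l₁ := L.take (L.length / 2)) (l₂ := L.drop (L.length / 2)) (a := s)
        rw [List.take_append_drop] at h
        exact h
      refine Prod.ext ?_ ?_ <;> simp [hc] <;> omega

theorem pvDisp_char (L : List String) :
    pvDisp L = ((L.count "n" : Int) - (L.count "s" : Int),
                (L.count "e" : Int) - (L.count "w" : Int)) :=
  pvDispF_char L.length L le_rfl

-- ===== VERDICT (by name: the statement is the Claim_ definition above) =====
theorem EX3_3_spec : Claim_equal_EX3_3 := by
  intro L _
  unfold Spec_EX3_3 EX3_3 EX3_3_alt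
  rw [EX3_3_fold_char, pvDisp_char]
  simp only [PySem.Set.mem_ofList, List.mem_cons, List.not_mem_nil, or_false, Prod.ext_iff,
    zero_add]
  by_cases hP : (((L.count "n" : Int) - (L.count "s" : Int) = 2 ∧ (L.count "e" : Int) - (L.count "w" : Int) = 3) ∨
      ((L.count "n" : Int) - (L.count "s" : Int) = 3 ∧ (L.count "e" : Int) - (L.count "w" : Int) = -4)) <;>
    simp_all
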